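-- pv_equiv track=rewrite | github.com/yhyeil/Algorithms_py | counting/counting.py | get_row_val
-- ===== SOURCE A (Python) =====
-- def get_row_val(s):
--     n = len(s)
--     value = 0
--
--     for i in range(n):
--         if s[i] == 'R':
--             value += n - i - 1
--         else:
--             value += i
--     return value
-- ===== SOURCE B (Python) =====
-- def get_row_val(s):
--     # Right-to-left scan with no index arithmetic: prepending a char shifts
--     # every non-'R' char already seen right by one (value += nonr), and a
--     # prepended 'R' contributes the number of chars after it (value += m).
--     m = 0        # chars processed so far (length of current suffix)
--     nonr = 0     # non-'R' chars in the current suffix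
--     value = 0
--     for c in reversed(s):
--         value += nonr + (m if c == 'R' else 0)
--         m += 1
--         if c != 'R':
--             nonr += 1
--     return value
-- ===== Notes on version B (the rewrite author's own statement) =====
-- stated objective: alternative
-- what changed: B scans the string right-to-left maintaining a running count of non-'R' characters seen so far, with no index or length arithmetic: each step adds that count (the shift cost of prepending a char) plus, for an 'R', the number of characters after it; A instead sums position-based terms i or n-i-1 in a left-to-right indexed loop.
import Mathlib
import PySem

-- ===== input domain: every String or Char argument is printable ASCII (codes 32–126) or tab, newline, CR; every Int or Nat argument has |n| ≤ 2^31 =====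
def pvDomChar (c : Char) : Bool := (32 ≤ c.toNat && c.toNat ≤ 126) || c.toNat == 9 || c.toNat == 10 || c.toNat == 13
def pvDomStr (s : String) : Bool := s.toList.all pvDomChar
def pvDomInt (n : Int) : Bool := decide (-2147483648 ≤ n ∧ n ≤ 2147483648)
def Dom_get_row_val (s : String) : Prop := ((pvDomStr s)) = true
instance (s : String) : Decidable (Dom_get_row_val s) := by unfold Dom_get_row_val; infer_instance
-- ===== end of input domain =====

-- B replaces A's indexed positional sum by a right-to-left scan counting non-'R' chars seen so far (alternative algorithm, same O(n) cost).

-- ===== PORT A =====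
-- for i in range(n): if s[i] == 'R': value += n-i-1 else: value += i
-- s[i] is always in range here, so pyGetD with an unused default is exact.
def get_row_val (s : String) : Int :=
  let n : Int := PySem.Str.len s
  (PySem.List.pyRange 0 n 1).foldl
    (fun value i =>
      if PySem.List.pyGetD s.toList i ' ' = 'R' then value + (n - i - 1) else value + i) 0

-- ===== PORT B =====
-- state = (m, nonr, value); one step per character of reversed(s)
def pvStepB (st : Int × Int × Int) (c : Char) : Int × Int × Int :=
  (st.1 + 1,
   st.2.1 + (if c = 'R' then 0 else 1),
   st.2.2 + st.2.1 + (if c = 'R' then st.1 else 0))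

def get_row_val_alt (s : String) : Int :=
  (s.toList.reverse.foldl pvStepB (0, 0, 0)).2.2

-- ===== PRECONDITION & SPEC =====
def Spec_get_row_val (s : String) (out : Int) : Prop := out = get_row_val_alt s
instance (s : String) (out : Int) : Decidable (Spec_get_row_val s out) := by unfold Spec_get_row_val; infer_instance

-- ===== CLAIM =====
def Claim_equal_get_row_val : Prop := ∀ (s : String), Dom_get_row_val s → Spec_get_row_val s (get_row_val s)

-- ===== LEMMAS AND PROOFS =====

-- the positional value of a character list, as an enumerate-sum
def pvVal (cs : List Char) : Int :=
  ((PySem.List.enumerate cs 0).map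
    (fun p => if p.2 = 'R' then (cs.length : Int) - p.1 - 1 else p.1)).sum

theorem pv_enum_shift (cs : List Char) (k : Int) :
    PySem.List.enumerate cs (k + 1)
      = (PySem.List.enumerate cs k).map (fun p => (p.1 + 1, p.2)) := by
  induction cs generalizing k with
  | nil => simp [PySem.List.enumerate_nil]
  | cons c t ih =>
    simp only [PySem.List.enumerate_cons, List.map_cons]
    rw [ih (k + 1)]

theorem pv_sum_ite_count (t : List Char) :
    (t.map (fun x => if x = 'R' then (0 : Int) else 1)).sum
      = (t.countP (fun x => decide (x ≠ 'R')) : Int) := by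
  induction t with
  | nil => simp
  | cons a t iht =>
    simp only [List.map_cons, List.sum_cons, List.countP_cons, iht]
    by_cases h : a = 'R' <;> simp [h, add_comm]

theorem pvVal_cons (c : Char) (t : List Char) :
    pvVal (c :: t)
      = pvVal t + (t.countP (fun x => decide (x ≠ 'R')) : Int)
          + (if c = 'R' then (t.length : Int) else 0) := by
  unfold pvVal
  rw [PySem.List.enumerate_cons, List.map_cons, List.sum_cons]
  have hsh := pv_enum_shift t 0
  norm_num at hsh
  simp only [zero_add]
  rw [hsh, List.map_map]
  have h1 :
      ((PySem.List.enumerate t 0).map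
        ((fun p : Int × Char => if p.2 = 'R' then ((c :: t).length : Int) - p.1 - 1 else p.1)
          ∘ fun p : Int × Char => (p.1 + 1, p.2))).sum
    = ((PySem.List.enumerate t 0).map
        (fun p : Int × Char =>
          (if p.2 = 'R' then (t.length : Int) - p.1 - 1 else p.1)
          + (if p.2 = 'R' then 0 else 1))).sum := by
    refine congrArg List.sum (List.map_congr_left fun p _ => ?_)
    simp only [Function.comp, List.length_cons]
    split_ifs <;> push_cast <;> ring
  have hsplit : ∀ (l : List (Int × Char)) (f g : Int × Char → Int),
      (l.map (fun p => f p + g p)).sum = (l.map f).sum + (l.map g).sum := by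
    intro l f g
    induction l with
    | nil => simp
    | cons a l ihl => simp only [List.map_cons, List.sum_cons, ihl]; ring
  rw [h1, hsplit]
  have h2 : ((PySem.List.enumerate t 0).map
        (fun p : Int × Char => if p.2 = 'R' then (0 : Int) else 1)).sum
      = (t.countP (fun x => decide (x ≠ 'R')) : Int) := by
    have hmap : (PySem.List.enumerate t 0).map
          (fun p : Int × Char => if p.2 = 'R' then (0 : Int) else 1)
        = t.map (fun x => if x = 'R' then (0 : Int) else 1) := by
      conv_rhs => rw [← PySem.List.map_snd_enumerate t (0 : Int), List.map_map]
      exact List.map_congr_left fun p _ => rfl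
    rw [hmap, pv_sum_ite_count]
  rw [h2]
  simp only [List.length_cons]
  push_cast
  split_ifs <;> ring

-- B's fold invariant: state after consuming t (right-to-left) is (len t, non-R count, pvVal t)
theorem pv_B_inv (cs : List Char) :
    cs.reverse.foldl pvStepB (0, 0, 0)
      = ((cs.length : Int), (cs.countP (fun x => decide (x ≠ 'R')) : Int), pvVal cs) := by
  induction cs with
  | nil => simp [pvVal, PySem.List.enumerate_nil]
  | cons c t ih =>
    rw [List.reverse_cons, List.foldl_append, ih]
    simp only [List.foldl_cons, List.foldl_nil, pvStepB, List.countP_cons, List.length_cons,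
      pvVal_cons]
    by_cases hc : c = 'R' <;> simp [hc]

-- A's indexed fold equals the enumerate-sum
theorem pv_A_eq (s : String) : get_row_val s = pvVal s.toList := by
  unfold get_row_val pvVal
  simp only [PySem.Str.len_eq]
  set cs := s.toList with hcs
  set n : Int := (cs.length : Int) with hn
  have h1 : (fun (value i : Int) =>
      if PySem.List.pyGetD cs i ' ' = 'R' then value + (n - i - 1) else value + i)
      = (fun value i => value +
          (if PySem.List.pyGetD cs i ' ' = 'R' then n - i - 1 else i)) := by
    funext v i; split_ifs <;> ring
  rw [h1, PySem.List.foldl_add]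
  rw [PySem.List.enumerate_eq_map_pyRange cs ' ', List.map_map]
  simp only [PySem.List.len_eq, ← hn]
  rw [zero_add]
  apply congrArg List.sum
  apply List.map_congr_left
  intro i _
  rfl
theorem pv_B_eq (s : String) : get_row_val_alt s = pvVal s.toList := by
  unfold get_row_val_alt
  rw [pv_B_inv]

-- ===== VERDICT =====
theorem get_row_val_spec : Claim_equal_get_row_val := by
  intro s _
  unfold Spec_get_row_val
  rw [pv_A_eq, pv_B_eq]
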